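-- pv_equiv track=rewrite | github.com/zacinC/DomaciZadaci | drugi_domaci/domaci2.py | najmanja_vrijednost_zbira_cijena
-- ===== SOURCE A (Python) =====
-- def najmanja_vrijednost_zbira_cijena(cijene):
--     min_zbir = float('inf')
--     par = ()
--
--     for i in range(len(cijene)):
--         for j in range(i+1, len(cijene)):
--             zbir = cijene[i] + cijene[j]
--             if zbir < min_zbir:
--                 min_zbir = zbir
--                 par = (cijene[i], cijene[j])
--
--     return par
-- ===== SOURCE B (Python) =====
-- def najmanja_vrijednost_zbira_cijena(cijene):
--     n = len(cijene)
--     if n < 2: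
--         return ()
--     sm = cijene[n-1]          # minimum of cijene[i+1:]
--     best = None
--     par = ()
--     for i in range(n-2, -1, -1):
--         cand = cijene[i] + sm
--         if best is None or cand <= best:   # <= so the earliest i wins ties
--             best = cand
--             par = (cijene[i], sm)
--         if cijene[i] < sm:
--             sm = cijene[i]
--     return par
-- ===== Notes on version B (the rewrite author's own statement) =====
-- stated objective: faster
-- what changed: Replaces A's O(n^2) nested all-pairs scan with a single backward pass that maintains the running minimum of the suffix and selects, with a non-strict test so the earliest index wins, the same pair (value-for-value, same tie-breaking) in O(n).
import Mathlib
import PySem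

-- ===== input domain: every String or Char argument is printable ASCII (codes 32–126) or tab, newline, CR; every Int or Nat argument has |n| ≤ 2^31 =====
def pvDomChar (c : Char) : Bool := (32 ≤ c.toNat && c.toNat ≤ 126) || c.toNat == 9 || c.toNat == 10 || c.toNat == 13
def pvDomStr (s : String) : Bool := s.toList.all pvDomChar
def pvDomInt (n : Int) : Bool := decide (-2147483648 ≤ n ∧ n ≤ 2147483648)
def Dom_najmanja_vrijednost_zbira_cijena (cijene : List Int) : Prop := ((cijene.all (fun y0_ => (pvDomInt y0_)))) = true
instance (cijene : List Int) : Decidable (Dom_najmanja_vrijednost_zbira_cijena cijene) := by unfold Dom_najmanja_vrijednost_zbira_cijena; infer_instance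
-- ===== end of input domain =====

-- B replaces A's O(n^2) all-pairs scan by a single backward pass with a running suffix minimum (O(n)); return value only (A returns a tuple, rendered here as a 0- or 2-element list).

-- ===== PORT A =====
def najmanja_vrijednost_zbira_cijena (cijene : List Int) : List Int :=
  -- min_zbir = float('inf') is modelled as `none`; par = () as []
  let n : Int := PySem.List.len cijene
  let fin : Option Int × List Int :=
    (PySem.List.pyRange 0 n 1).foldl
      (fun st i =>
        (PySem.List.pyRange (i + 1) n 1).foldl
          (fun (st : Option Int × List Int) j =>
            let zbir := PySem.List.pyGetD cijene i 0 + PySem.List.pyGetD cijene j 0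
            match st.1 with
            | none => (some zbir, [PySem.List.pyGetD cijene i 0, PySem.List.pyGetD cijene j 0])
            | some m =>
              if zbir < m then
                (some zbir, [PySem.List.pyGetD cijene i 0, PySem.List.pyGetD cijene j 0])
              else st)
          st)
      ((none : Option Int), ([] : List Int))
  fin.2

-- ===== PORT B =====
def najmanja_vrijednost_zbira_cijena_alt (cijene : List Int) : List Int :=
  let n : Int := PySem.List.len cijene
  if n < 2 then []
  else
    -- state: (sm = min of cijene[i+1:], best = None|best sum, par)
    let fin : Int × Option Int × List Int :=
      (PySem.List.pyRange (n - 2) (-1) (-1)).foldl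
        (fun (st : Int × Option Int × List Int) i =>
          let x := PySem.List.pyGetD cijene i 0
          let cand := x + st.1
          let st' :=
            match st.2.1 with
            | none => (some cand, [x, st.1])
            | some b => if cand ≤ b then (some cand, [x, st.1]) else st.2
          (if x < st.1 then x else st.1, st'))
        (PySem.List.pyGetD cijene (n - 1) 0, (none : Option Int), ([] : List Int))
    fin.2.2

-- ===== PRECONDITION & SPEC =====
def Spec_najmanja_vrijednost_zbira_cijena (cijene : List Int) (out : List Int) : Prop := out = najmanja_vrijednost_zbira_cijena_alt cijene
instance (cijene : List Int) (out : List Int) : Decidable (Spec_najmanja_vrijednost_zbira_cijena cijene out) := by unfold Spec_najmanja_vrijednost_zbira_cijena; infer_instance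

-- ===== CLAIM (what is proved, stated in full; the proofs are below) =====
def Claim_equal_najmanja_vrijednost_zbira_cijena : Prop := ∀ (cijene : List Int), Dom_najmanja_vrijednost_zbira_cijena cijene → Spec_najmanja_vrijednost_zbira_cijena cijene (najmanja_vrijednost_zbira_cijena cijene)

-- ===== LEMMAS AND PROOFS =====

-- state update with strict improvement (A's loop body)
def pvUpdLt (st : Option Int × List Int) (s : Int) (p : List Int) : Option Int × List Int :=
  match st.1 with
  | none => (some s, p)
  | some m => if s < m then (some s, p) else st

-- state update with non-strict improvement (B's loop body: earliest index wins when scanning backwards)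
def pvUpdLe (st : Option Int × List Int) (s : Int) (p : List Int) : Option Int × List Int :=
  match st.1 with
  | none => (some s, p)
  | some m => if s ≤ m then (some s, p) else st

def pvMinL (a : Int) (l : List Int) : Int := l.foldl min a

def pvMinHead : List Int → Int
  | [] => 0
  | x :: t => pvMinL x t

-- candidates (a[i], min a[i+1:]) in order of i
def pvPairs : List Int → List (Int × Int)
  | [] => []
  | [_] => []
  | x :: y :: t => (x, pvMinL y t) :: pvPairs (y :: t)

-- the selected (best sum, pair): minimal sum, earliest candidate
def pvSel : List (Int × Int) → Option Int × List Int
  | [] => (none, [])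
  | c :: cs => pvUpdLe (pvSel cs) (c.1 + c.2) [c.1, c.2]

def pvMerge (st r : Option Int × List Int) : Option Int × List Int :=
  match r.1 with
  | none => st
  | some s => pvUpdLt st s r.2

-- A's outer loop structurally over the list
def pvLoopA : List Int → Option Int × List Int → Option Int × List Int
  | [], st => st
  | x :: xs, st => pvLoopA xs (xs.foldl (fun st y => pvUpdLt st (x + y) [x, y]) st)

-- B's backward step
def pvStep (x : Int) (st : Int × Option Int × List Int) : Int × Option Int × List Int :=
  (if x < st.1 then x else st.1, pvUpdLe st.2 (x + st.1) [x, st.1])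

lemma pvMinL_min (a b : Int) (l : List Int) : pvMinL (min a b) l = min a (pvMinL b l) := by
  induction l generalizing b with
  | nil => rfl
  | cons c t ih =>
    simp only [pvMinL, List.foldl_cons] at *
    rw [min_assoc, ih]

lemma pvMinHead_cons (x : Int) (u : List Int) (hu : u ≠ []) :
    pvMinHead (x :: u) = min x (pvMinHead u) := by
  cases u with
  | nil => exact absurd rfl hu
  | cons a r =>
    simp only [pvMinHead, pvMinL, List.foldl_cons]
    rw [show List.foldl min (min x a) r = pvMinL (min x a) r from rfl, pvMinL_min]
    rfl

lemma pvPairs_cons (x : Int) (u : List Int) (hu : u ≠ []) :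
    pvPairs (x :: u) = (x, pvMinHead u) :: pvPairs u := by
  cases u with
  | nil => exact absurd rfl hu
  | cons a r => rfl

lemma pvUpdLt_pvUpdLt (st : Option Int × List Int) (s1 s2 : Int) (p1 p2 : List Int) :
    pvUpdLt (pvUpdLt st s1 p1) s2 p2
      = if s2 < s1 then pvUpdLt st s2 p2 else pvUpdLt st s1 p1 := by
  obtain ⟨m, p⟩ := st
  cases m with
  | none => simp only [pvUpdLt]
  | some m =>
    simp only [pvUpdLt]
    split_ifs
    all_goals (simp_all; try omega)

-- collapse of A's inner loop: equal to a single strict update with the suffix minimum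
lemma pvInner_collapse (x y : Int) (t : List Int) (st : Option Int × List Int) :
    (y :: t).foldl (fun st z => pvUpdLt st (x + z) [x, z]) st
      = pvUpdLt st (x + pvMinL y t) [x, pvMinL y t] := by
  induction t generalizing y st with
  | nil => rfl
  | cons z t' ih =>
    have h1 : (y :: z :: t').foldl (fun st z => pvUpdLt st (x + z) [x, z]) st
        = (z :: t').foldl (fun st z => pvUpdLt st (x + z) [x, z]) (pvUpdLt st (x + y) [x, y]) := rfl
    rw [h1, ih, pvUpdLt_pvUpdLt]
    have h2 : pvMinL y (z :: t') = min y (pvMinL z t') := by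
      show pvMinHead (y :: z :: t') = min y (pvMinHead (z :: t'))
      exact pvMinHead_cons y (z :: t') (by simp)
    rw [h2]
    rcases le_or_gt y (pvMinL z t') with h | h
    · rw [if_neg (by omega), min_eq_left h]
    · rw [if_pos (by omega), min_eq_right (le_of_lt h)]

lemma pvLoopA_eq_pairs (l : List Int) (st : Option Int × List Int) :
    pvLoopA l st = (pvPairs l).foldl (fun st c => pvUpdLt st (c.1 + c.2) [c.1, c.2]) st := by
  induction l generalizing st with
  | nil => rfl
  | cons x u ih =>
    cases u with
    | nil => rfl
    | cons y t =>
      show pvLoopA (y :: t) ((y :: t).foldl (fun st z => pvUpdLt st (x + z) [x, z]) st) = _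
      rw [pvInner_collapse, ih]
      rfl

lemma pvFoldLt_eq_merge_sel (cs : List (Int × Int)) (st : Option Int × List Int) :
    cs.foldl (fun st c => pvUpdLt st (c.1 + c.2) [c.1, c.2]) st = pvMerge st (pvSel cs) := by
  induction cs generalizing st with
  | nil => rfl
  | cons c cs' ih =>
    have h1 : (c :: cs').foldl (fun st c => pvUpdLt st (c.1 + c.2) [c.1, c.2]) st
        = cs'.foldl (fun st c => pvUpdLt st (c.1 + c.2) [c.1, c.2]) (pvUpdLt st (c.1 + c.2) [c.1, c.2]) := rfl
    rw [h1, ih]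
    show pvMerge (pvUpdLt st (c.1 + c.2) [c.1, c.2]) (pvSel cs')
        = pvMerge st (pvUpdLe (pvSel cs') (c.1 + c.2) [c.1, c.2])
    obtain ⟨r1, r2⟩ := pvSel cs'
    cases r1 with
    | none => rfl
    | some s =>
      simp only [pvMerge, pvUpdLe]
      rcases le_or_gt (c.1 + c.2) s with h | h
      · rw [if_pos h]
        show pvUpdLt (pvUpdLt st (c.1 + c.2) [c.1, c.2]) s r2 = pvUpdLt st (c.1 + c.2) [c.1, c.2]
        rw [pvUpdLt_pvUpdLt, if_neg (by omega)]
      · rw [if_neg (by omega)]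
        show pvUpdLt (pvUpdLt st (c.1 + c.2) [c.1, c.2]) s r2 = pvUpdLt st s r2
        rw [pvUpdLt_pvUpdLt, if_pos h]

lemma pvMerge_none_sel (cs : List (Int × Int)) : pvMerge (none, []) (pvSel cs) = pvSel cs := by
  cases cs with
  | nil => rfl
  | cons c cs' =>
    show pvMerge (none, []) (pvUpdLe (pvSel cs') (c.1 + c.2) [c.1, c.2])
        = pvUpdLe (pvSel cs') (c.1 + c.2) [c.1, c.2]
    generalize pvSel cs' = r
    obtain ⟨r1, r2⟩ := r
    cases r1 with
    | none => rfl
    | some s =>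
      simp only [pvUpdLe]
      split_ifs <;> rfl


-- bridge: A's index loops equal pvLoopA
lemma pvA_bridge (cijene : List Int) : ∀ (d : Nat), d ≤ cijene.length → ∀ (st : Option Int × List Int),
    (PySem.List.pyRange ((cijene.length - d : Nat) : Int) (cijene.length : Int) 1).foldl
      (fun st i =>
        (PySem.List.pyRange (i + 1) (cijene.length : Int) 1).foldl
          (fun (st : Option Int × List Int) j =>
            let zbir := PySem.List.pyGetD cijene i 0 + PySem.List.pyGetD cijene j 0
            match st.1 with
            | none => (some zbir, [PySem.List.pyGetD cijene i 0, PySem.List.pyGetD cijene j 0])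
            | some m =>
              if zbir < m then
                (some zbir, [PySem.List.pyGetD cijene i 0, PySem.List.pyGetD cijene j 0])
              else st)
          st)
      st
    = pvLoopA (cijene.drop (cijene.length - d)) st := by
  intro d
  induction d with
  | zero =>
    intro _ st
    rw [Nat.sub_zero, PySem.List.pyRange_one_eq_nil (le_refl _), List.drop_length]
    rfl
  | succ d ih =>
    intro hd st
    have hk : cijene.length - (d + 1) < cijene.length := by omega
    have hkI : ((cijene.length - (d + 1) : Nat) : Int) < (cijene.length : Int) := by
      exact_mod_cast hk
    rw [PySem.List.pyRange_one_cons hkI, List.foldl_cons]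
    have hsucc : ((cijene.length - (d + 1) : Nat) : Int) + 1 = ((cijene.length - d : Nat) : Int) := by
      omega
    rw [hsucc, ih (by omega)]
    have hx : PySem.List.pyGetD cijene ((cijene.length - (d + 1) : Nat) : Int) 0
        = cijene[cijene.length - (d + 1)] := by
      rw [PySem.List.pyGetD_eq_getElem cijene 0 (by omega) (by simpa using hkI)]
      simp
    have hdrop : cijene.drop (cijene.length - (d + 1))
        = PySem.List.pyGetD cijene ((cijene.length - (d + 1) : Nat) : Int) 0
            :: cijene.drop (cijene.length - d) := by
      rw [hx, List.drop_eq_getElem_cons hk, show cijene.length - (d + 1) + 1 = cijene.length - d by omega]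
    rw [hdrop]
    simp only [pvLoopA]
    congr 1
    have hlen : (cijene.length : Int) = PySem.List.len cijene := by
      simp [PySem.List.len_eq]
    have htn : ((cijene.length - d : Nat) : Int).toNat = cijene.length - d := by omega
    have hinner := PySem.List.foldl_pyRange_pyGetD cijene 0
        (fun st y => pvUpdLt st (PySem.List.pyGetD cijene ((cijene.length - (d + 1) : Nat) : Int) 0 + y)
          [PySem.List.pyGetD cijene ((cijene.length - (d + 1) : Nat) : Int) 0, y]) st
        (a := ((cijene.length - d : Nat) : Int)) (by omega)
    rw [htn, ← hlen] at hinner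
    exact hinner

-- B's backward pass computes (suffix minimum, selected candidate)
lemma pvBk_eq_sel (l : List Int) (z : Int) :
    l.foldr pvStep (z, (none : Option Int), ([] : List Int))
      = (pvMinHead (l ++ [z]), pvSel (pvPairs (l ++ [z]))) := by
  induction l with
  | nil => rfl
  | cons x t ih =>
    have hne : t ++ [z] ≠ [] := by simp
    rw [List.foldr_cons, ih]
    simp only [pvStep, List.cons_append]
    rw [pvMinHead_cons x (t ++ [z]) hne, pvPairs_cons x (t ++ [z]) hne]
    rw [show pvSel ((x, pvMinHead (t ++ [z])) :: pvPairs (t ++ [z]))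
        = pvUpdLe (pvSel (pvPairs (t ++ [z]))) (x + pvMinHead (t ++ [z])) [x, pvMinHead (t ++ [z])]
      from rfl]
    congr 1
    rcases le_or_gt x (pvMinHead (t ++ [z])) with h | h
    · rw [min_eq_left h]
      by_cases hx : x < pvMinHead (t ++ [z])
      · rw [if_pos hx]
      · rw [if_neg hx]
        omega
    · rw [if_neg (by omega), min_eq_right (le_of_lt h)]

-- (pyRange 0 m 1).map (getD) = take m
lemma pvMap_range_take (cijene : List Int) : ∀ (m : Nat), m ≤ cijene.length →
    (PySem.List.pyRange 0 (m : Int) 1).map (fun i => PySem.List.pyGetD cijene i 0) = cijene.take m := by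
  intro m
  induction m with
  | zero =>
    intro _
    have h0 : ((0 : Nat) : Int) = 0 := by norm_num
    rw [h0, PySem.List.pyRange_one_eq_nil (le_refl _)]
    rfl
  | succ m ih =>
    intro hm
    have h1 : ((m + 1 : Nat) : Int) = (m : Int) + 1 := by push_cast; ring
    rw [h1, PySem.List.pyRange_one_succ_right (by omega), List.map_append, ih (by omega)]
    have h2 : PySem.List.pyGetD cijene (m : Int) 0 = cijene[m]'(by omega) := by
      rw [PySem.List.pyGetD_eq_getElem cijene 0 (by omega) (by exact_mod_cast hm)]
      simp
    simp only [List.map_cons, List.map_nil, h2]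
    rw [List.take_add_one, List.getElem?_eq_getElem (by omega)]
    rfl

lemma pvA_sel (cijene : List Int) :
    najmanja_vrijednost_zbira_cijena cijene = (pvSel (pvPairs cijene)).2 := by
  have h := pvA_bridge cijene cijene.length (le_refl _) ((none : Option Int), ([] : List Int))
  rw [Nat.sub_self, List.drop_zero] at h
  have h0 : ((0 : Nat) : Int) = 0 := by norm_num
  rw [h0] at h
  rw [show (cijene.length : Int) = PySem.List.len cijene from by simp [PySem.List.len_eq]] at h
  have hA : najmanja_vrijednost_zbira_cijena cijene
      = (pvLoopA cijene ((none : Option Int), ([] : List Int))).2 := congrArg Prod.snd h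
  rw [hA, pvLoopA_eq_pairs, pvFoldLt_eq_merge_sel, pvMerge_none_sel]

lemma pvB_sel_long (cijene : List Int) (h2 : 2 ≤ cijene.length) :
    najmanja_vrijednost_zbira_cijena_alt cijene = (pvSel (pvPairs cijene)).2 := by
  have hne : cijene ≠ [] := by
    intro h; rw [h] at h2; simp at h2
  have hB : najmanja_vrijednost_zbira_cijena_alt cijene
      = if PySem.List.len cijene < 2 then ([] : List Int)
        else ((PySem.List.pyRange (PySem.List.len cijene - 2) (-1) (-1)).foldl
          (fun (st : Int × Option Int × List Int) i =>
            let x := PySem.List.pyGetD cijene i 0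
            let cand := x + st.1
            let st' :=
              match st.2.1 with
              | none => (some cand, [x, st.1])
              | some b => if cand ≤ b then (some cand, [x, st.1]) else st.2
            (if x < st.1 then x else st.1, st'))
          (PySem.List.pyGetD cijene (PySem.List.len cijene - 1) 0,
            (none : Option Int), ([] : List Int))).2.2 := rfl
  have hlen : PySem.List.len cijene = (cijene.length : Int) := by simp [PySem.List.len_eq]
  rw [hB, hlen, if_neg (by omega)]
  have hlast : PySem.List.pyGetD cijene ((cijene.length : Int) - 1) 0
      = cijene.getLast hne := by
    rw [show ((cijene.length : Int) - 1) = ((cijene.length - 1 : Nat) : Int) from by omega]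
    rw [PySem.List.pyGetD_eq_getElem cijene 0 (by omega) (by omega)]
    rw [List.getLast_eq_getElem]
    congr 1
  rw [hlast]
  rw [PySem.List.pyRange_neg_one_eq_reverse ((cijene.length : Int) - 2) (-1)]
  rw [show ((-1 : Int) + 1) = 0 from by norm_num,
      show ((cijene.length : Int) - 2 + 1) = ((cijene.length - 1 : Nat) : Int) from by omega]
  rw [List.foldl_reverse]
  have hstep : (fun (x : Int) (y : Int × Option Int × List Int) =>
        (fun (st : Int × Option Int × List Int) (i : Int) =>
          let x := PySem.List.pyGetD cijene i 0
          let cand := x + st.1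
          let st' :=
            match st.2.1 with
            | none => (some cand, [x, st.1])
            | some b => if cand ≤ b then (some cand, [x, st.1]) else st.2
          (if x < st.1 then x else st.1, st')) y x)
      = (fun (i : Int) (st : Int × Option Int × List Int) =>
          pvStep (PySem.List.pyGetD cijene i 0) st) := rfl
  rw [hstep]
  have hfold : ((PySem.List.pyRange 0 ((cijene.length - 1 : Nat) : Int) 1).map
        (fun i => PySem.List.pyGetD cijene i 0)).foldr pvStep
        (cijene.getLast hne, (none : Option Int), ([] : List Int))
      = (PySem.List.pyRange 0 ((cijene.length - 1 : Nat) : Int) 1).foldr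
        (fun i st => pvStep (PySem.List.pyGetD cijene i 0) st)
        (cijene.getLast hne, (none : Option Int), ([] : List Int)) := by
    rw [List.foldr_map]
  rw [← hfold]
  rw [pvMap_range_take cijene (cijene.length - 1) (by omega)]
  rw [show cijene.take (cijene.length - 1) = cijene.dropLast from by rw [List.dropLast_eq_take]]
  rw [pvBk_eq_sel cijene.dropLast (cijene.getLast hne)]
  rw [List.dropLast_concat_getLast hne]

-- ===== VERDICT (by name: the statement is the Claim_ definition above) =====
theorem najmanja_vrijednost_zbira_cijena_spec : Claim_equal_najmanja_vrijednost_zbira_cijena := by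
  intro cijene _
  unfold Spec_najmanja_vrijednost_zbira_cijena
  match cijene with
  | [] => rfl
  | [x] =>
    rw [pvA_sel]
    rfl
  | x :: y :: t =>
    rw [pvA_sel, pvB_sel_long (x :: y :: t) (by simp)]
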